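-- pv_equiv track=rewrite | github.com/rjury-sumo/sumologic-cse-python-sdk | scripts/examples/get_log_mappings.py | filter_by_vendor_product
-- ===== SOURCE A (Python) =====
-- def filter_by_vendor_product(mappings, vendor, product):
--     """Filter mappings by vendor and/or product."""
--     filtered_mappings = mappings
--
--     if vendor:
--         vendor_lower = vendor.lower()
--         filtered_mappings = [m for m in filtered_mappings
--                            if vendor_lower in m.get('vendor', '').lower()]
--
--     if product:
--         product_lower = product.lower()
--         filtered_mappings = [m for m in filtered_mappings
--                            if product_lower in m.get('product', '').lower()]
--
--     return filtered_mappings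
-- ===== SOURCE B (Python) =====
-- def filter_by_vendor_product(mappings, vendor, product):
--     """Filter mappings by vendor and/or product (single pass)."""
--     return [m for m in mappings
--             if (not vendor or vendor.lower() in m.get('vendor', '').lower())
--             and (not product or product.lower() in m.get('product', '').lower())]
-- ===== Notes on version B (the rewrite author's own statement) =====
-- stated objective: simpler
-- what changed: One comprehension over mappings with a compound short-circuiting predicate replaces A's two sequential filtering passes that rebuild an intermediate list; B always returns a new list (A returns the input object itself when both filters are falsy; return VALUE is identical).
import Mathlib
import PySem

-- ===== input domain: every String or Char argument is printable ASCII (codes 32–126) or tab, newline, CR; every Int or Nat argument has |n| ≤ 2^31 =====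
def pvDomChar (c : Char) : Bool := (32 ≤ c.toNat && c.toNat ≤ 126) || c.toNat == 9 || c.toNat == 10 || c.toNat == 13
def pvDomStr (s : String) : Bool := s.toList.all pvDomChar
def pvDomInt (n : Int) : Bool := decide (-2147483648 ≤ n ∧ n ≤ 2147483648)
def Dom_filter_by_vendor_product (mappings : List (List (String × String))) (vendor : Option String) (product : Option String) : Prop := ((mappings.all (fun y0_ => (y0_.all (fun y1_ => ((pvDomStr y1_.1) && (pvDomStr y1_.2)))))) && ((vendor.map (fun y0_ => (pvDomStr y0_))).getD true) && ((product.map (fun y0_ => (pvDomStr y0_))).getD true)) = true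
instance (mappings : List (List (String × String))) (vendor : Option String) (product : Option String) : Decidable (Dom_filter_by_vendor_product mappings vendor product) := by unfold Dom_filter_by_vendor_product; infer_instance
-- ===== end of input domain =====

-- B replaces A's two sequential filtering passes by a single comprehension with a compound short-circuiting predicate (simpler; return value identical, though A returns the input object itself when both filters are falsy while B builds a new list).


-- ===== PORT A =====
-- A: two sequential filter passes (each 'if arg:' guard keeps the list unchanged on falsy arg)
def filter_by_vendor_product (mappings : List (List (String × String))) (vendor : Option String) (product : Option String) : List (List (String × String)) :=
  let filtered0 := mappings
  let filtered1 :=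
    match vendor with
    | none => filtered0
    | some v =>
      if v = "" then filtered0
      else
        let vendor_lower := PySem.Str.lower v
        filtered0.filter (fun m => PySem.Str.isIn vendor_lower (PySem.Str.lower (PySem.Dict.getD (PySem.Dict.mk m) "vendor" "")))
  let filtered2 :=
    match product with
    | none => filtered1
    | some p =>
      if p = "" then filtered1
      else
        let product_lower := PySem.Str.lower p
        filtered1.filter (fun m => PySem.Str.isIn product_lower (PySem.Str.lower (PySem.Dict.getD (PySem.Dict.mk m) "product" "")))
  filtered2

-- ===== PORT B =====
-- B: one pass, compound short-circuiting predicate ('not arg or arg.lower() in m.get(key,'').lower()')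
def pvPass (key : String) (arg : Option String) (m : List (String × String)) : Bool :=
  match arg with
  | none => true
  | some s => decide (s = "") || PySem.Str.isIn (PySem.Str.lower s) (PySem.Str.lower (PySem.Dict.getD (PySem.Dict.mk m) key ""))

def filter_by_vendor_product_alt (mappings : List (List (String × String))) (vendor : Option String) (product : Option String) : List (List (String × String)) :=
  mappings.filter (fun m => pvPass "vendor" vendor m && pvPass "product" product m)

-- ===== PRECONDITION & SPEC =====
def Spec_filter_by_vendor_product (mappings : List (List (String × String))) (vendor : Option String) (product : Option String) (out : List (List (String × String))) : Prop := out = filter_by_vendor_product_alt mappings vendor product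
instance (mappings : List (List (String × String))) (vendor : Option String) (product : Option String) (out : List (List (String × String))) : Decidable (Spec_filter_by_vendor_product mappings vendor product out) := by unfold Spec_filter_by_vendor_product; infer_instance

-- ===== CLAIM (what is proved, stated in full; the proofs are below) =====
def Claim_equal_filter_by_vendor_product : Prop := ∀ (mappings : List (List (String × String))) (vendor : Option String) (product : Option String), Dom_filter_by_vendor_product mappings vendor product → Spec_filter_by_vendor_product mappings vendor product (filter_by_vendor_product mappings vendor product)

-- ===== LEMMAS AND PROOFS =====

-- ===== VERDICT (by name: the statement is the Claim_ definition above) =====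
theorem filter_by_vendor_product_spec : Claim_equal_filter_by_vendor_product := by
  intro mappings vendor product _
  unfold Spec_filter_by_vendor_product filter_by_vendor_product filter_by_vendor_product_alt pvPass
  rcases vendor with _ | v <;> rcases product with _ | p <;> simp <;>
    split_ifs <;>
      first
      | rfl
      | (simp_all; done)
      | ((try simp only [List.filter_filter]); apply List.filter_congr; intro x _; first | rfl | simp_all [Bool.and_comm])
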